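-- pv_equiv track=rewrite | github.com/compositedev/aquarius | aquarius/app/assets.py | _reorder_services
-- ===== SOURCE A (Python) =====
-- def _reorder_services(services):
--     result = []
--     for service in services:
--         if service['type'] == 'metadata':
--             result.append(service)
--
--     for service in services:
--         if service['type'] != 'metadata':
--             result.append(service)
--
--     return result
-- ===== SOURCE B (Python) =====
-- def _reorder_services(services):
--     return sorted(services, key=lambda s: s['type'] != 'metadata')
-- ===== Notes on version B (the rewrite author's own statement) =====
-- stated objective: idiomatic
-- what changed: Replaces the two explicit filtering passes with a single stable sort keyed on the boolean s['type'] != 'metadata', so metadata services come first and relative order is preserved by sort stability.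
import Mathlib
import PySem

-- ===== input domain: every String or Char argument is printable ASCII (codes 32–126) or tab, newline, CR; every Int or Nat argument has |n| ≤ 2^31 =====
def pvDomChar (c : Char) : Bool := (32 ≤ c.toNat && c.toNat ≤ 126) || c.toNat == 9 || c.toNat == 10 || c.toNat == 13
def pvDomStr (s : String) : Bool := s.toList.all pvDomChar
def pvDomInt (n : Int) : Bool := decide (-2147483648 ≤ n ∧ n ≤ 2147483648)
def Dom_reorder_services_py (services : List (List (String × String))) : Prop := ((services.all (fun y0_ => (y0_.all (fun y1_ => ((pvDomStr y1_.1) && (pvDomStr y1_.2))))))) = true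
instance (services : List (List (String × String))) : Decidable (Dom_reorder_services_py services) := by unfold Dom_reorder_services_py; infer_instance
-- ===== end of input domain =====

-- B replaces A's two filtering passes with one stable sort on the boolean key
-- s['type'] != 'metadata' (same output; a different strategy, not faster).

-- ===== PORT A =====
-- service['type'] (Pre_ guarantees the key is present; getD "" is never used inside Pre_)
def pvTypeOf (service : List (String × String)) : String :=
  (PySem.Dict.get? ⟨service⟩ "type").getD ""

def reorder_services_py (services : List (List (String × String))) : List (List (String × String)) :=
  -- first loop: append the metadata services
  let result := services.foldl (fun r service => if pvTypeOf service == "metadata" then r ++ [service] else r) []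
  -- second loop: append the non-metadata services
  services.foldl (fun r service => if pvTypeOf service != "metadata" then r ++ [service] else r) result

-- ===== PORT B =====
def reorder_services_py_alt (services : List (List (String × String))) : List (List (String × String)) :=
  PySem.List.sorted services (fun s => pvTypeOf s != "metadata") false

-- ===== PRECONDITION & SPEC =====
-- Pre_ excludes services without a 'type' key, on which both Pythons raise KeyError.
def Pre_reorder_services_py (services : List (List (String × String))) : Prop :=
  (services.all (fun s => (PySem.Dict.get? ⟨s⟩ "type").isSome)) = true
instance (services : List (List (String × String))) : Decidable (Pre_reorder_services_py services) := by
  unfold Pre_reorder_services_py; infer_instance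

def pvWitness_reorder_services_py : (List (List (String × String))) :=
  [[("type", "metadata")], [("type", "access")]]

def Spec_reorder_services_py (services : List (List (String × String))) (out : List (List (String × String))) : Prop := out = reorder_services_py_alt services
instance (services : List (List (String × String))) (out : List (List (String × String))) : Decidable (Spec_reorder_services_py services out) := by unfold Spec_reorder_services_py; infer_instance

-- ===== CLAIM (what is proved, stated in full; the proofs are below) =====
def Claim_equal_reorder_services_py : Prop := ∀ (services : List (List (String × String))), Dom_reorder_services_py services → Pre_reorder_services_py services → Spec_reorder_services_py services (reorder_services_py services)

-- ===== LEMMAS AND PROOFS =====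

-- With key p, the comparison 'decide (p a < p b)' is the Boolean '!p a && p b'.
theorem pv_before_eq {α : Type} (p : α → Bool) :
    (fun a b => decide (p a < p b)) = (fun a b => !p a && p b) := by
  funext a b; cases hpa : p a <;> cases hpb : p b <;> simp [Bool.lt_iff]

-- A key-true element is inserted at the very end of any list.
theorem pv_insertBy_true {α : Type} (p : α → Bool) (x : α) (hx : p x = true) :
    ∀ l : List α, PySem.List.insertBy (fun a b => !p a && p b) x l = l ++ [x] := by
  intro l
  induction l with
  | nil => simp [PySem.List.insertBy]
  | cons y ys ih => simp [PySem.List.insertBy, hx, ih]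

-- A key-false element is inserted right after the key-false block F, before the key-true block T.
theorem pv_insertBy_false {α : Type} (p : α → Bool) (x : α) (hx : p x = false)
    (F T : List α) (hF : ∀ y ∈ F, p y = false) (hT : ∀ y ∈ T, p y = true) :
    PySem.List.insertBy (fun a b => !p a && p b) x (F ++ T) = F ++ x :: T := by
  induction F with
  | nil =>
    cases T with
    | nil => simp [PySem.List.insertBy]
    | cons y ys => simp [PySem.List.insertBy, hx, hT y (by simp)]
  | cons f fs ih =>
    have hf : p f = false := hF f (by simp)
    simp only [List.cons_append, PySem.List.insertBy, hf, Bool.and_false, Bool.false_eq_true, if_false]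
    exact congrArg (f :: ·) (ih (fun y hy => hF y (by simp [hy])))

-- Stable sort on a boolean key is the two-block partition: key-false first, key-true after.
theorem pv_sorted_bool {α : Type} (xs : List α) (p : α → Bool) :
    PySem.List.sorted xs p false = xs.filter (fun x => !p x) ++ xs.filter p := by
  rw [PySem.List.sorted_eq_foldl_insertBy, pv_before_eq p]
  suffices h : ∀ (ys F T : List α), (∀ y ∈ F, p y = false) → (∀ y ∈ T, p y = true) →
      ys.foldl (fun acc x => PySem.List.insertBy (fun a b => !p a && p b) x acc) (F ++ T)
        = (F ++ ys.filter (fun x => !p x)) ++ (T ++ ys.filter p) by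
    simpa using h xs [] [] (by simp) (by simp)
  intro ys
  induction ys with
  | nil => intro F T _ _; simp
  | cons x xs ih =>
    intro F T hF hT
    rw [List.foldl_cons]
    cases hpx : p x with
    | false =>
      rw [pv_insertBy_false p x hpx F T hF hT]
      have hF' : ∀ y ∈ F ++ [x], p y = false := by
        intro y hy; rcases List.mem_append.mp hy with h | h
        · exact hF y h
        · simp_all
      have := ih (F ++ [x]) T hF' hT
      simp_all
    | true =>
      rw [pv_insertBy_true p x hpx (F ++ T), List.append_assoc]
      have hT' : ∀ y ∈ T ++ [x], p y = true := by
        intro y hy; rcases List.mem_append.mp hy with h | h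
        · exact hT y h
        · simp_all
      have := ih F (T ++ [x]) hF hT'
      simp_all

-- ===== VERDICT (by name: the statement is the Claim_ definition above) =====
theorem reorder_services_py_spec : Claim_equal_reorder_services_py := by
  intro services _ _
  unfold Spec_reorder_services_py reorder_services_py reorder_services_py_alt
  rw [pv_sorted_bool services (fun s => pvTypeOf s != "metadata")]
  rw [PySem.List.foldl_append_if, PySem.List.foldl_append_if]
  simp only [List.map_id', List.nil_append, bne, Bool.not_not]
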